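-- pv_equiv track=rewrite | github.com/thale154/LeetCode_practice | 462-minimum-moves-to-equal-array-elements-ii/462-minimum-moves-to-equal-array-elements-ii.py | minMoves2
-- ===== SOURCE A (Python) =====
-- from typing import List
--
-- def minMoves2(nums: List[int]) -> int:
--     nums = sorted(nums)
--     n = len(nums)
--     median = nums[n // 2]
--     res = 0
--     for num in nums:
--         res += abs(median - num)
--     return res
-- ===== SOURCE B (Python) =====
-- from typing import List
--
-- def minMoves2(nums: List[int]) -> int:
--     # Quickselect the n//2-th order statistic (no full sort), then one pass
--     # summing |median - x| over the unsorted input.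
--     def select(xs, k):
--         p = xs[0]
--         lt = [x for x in xs if x < p]
--         if k < len(lt):
--             return select(lt, k)
--         eq = [x for x in xs if x == p]
--         if k < len(lt) + len(eq):
--             return p
--         return select([x for x in xs if x > p], k - len(lt) - len(eq))
--     m = select(nums, len(nums) // 2)
--     return sum(abs(m - x) for x in nums)
-- ===== Notes on version B (the rewrite author's own statement) =====
-- stated objective: alternative
-- what changed: B never sorts: it finds the n//2-th order statistic by quickselect (partition into <pivot / ==pivot / >pivot and recurse into one side) and then sums |median-x| in one pass over the unsorted input, whereas A sorts the whole list and indexes the middle.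
import Mathlib
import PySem

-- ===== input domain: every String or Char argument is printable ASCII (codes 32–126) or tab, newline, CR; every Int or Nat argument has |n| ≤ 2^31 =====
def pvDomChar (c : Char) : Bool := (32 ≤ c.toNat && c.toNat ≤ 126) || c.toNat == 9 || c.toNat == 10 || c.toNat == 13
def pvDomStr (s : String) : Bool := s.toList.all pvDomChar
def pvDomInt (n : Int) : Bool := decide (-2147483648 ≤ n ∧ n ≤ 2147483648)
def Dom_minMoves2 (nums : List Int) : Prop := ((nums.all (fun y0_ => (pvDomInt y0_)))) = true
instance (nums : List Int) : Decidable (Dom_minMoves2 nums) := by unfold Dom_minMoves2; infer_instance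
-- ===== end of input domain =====

-- B replaces A's full sort by a quickselect of the n//2-th order statistic plus one
-- abs-sum pass over the unsorted input (alternative algorithm, same return value);
-- proved equal on every non-empty list (both Pythons raise IndexError on []).


-- ===== PORT A =====
def minMoves2 (nums : List Int) : Int :=
  let s := PySem.List.sorted nums (fun x => x) false
  let n : Int := PySem.List.len s
  let median : Int := PySem.List.pyGetD s (PySem.Int.floordiv n 2) 0
  s.foldl (fun res num => res + |median - num|) 0

-- ===== PORT B =====
-- quickselect: the k-th smallest of xs (k always in range on the inputs B reaches;
-- Python raises IndexError on [] and so does A, excluded by Pre_)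
def pvSelect : List Int → Nat → Int
  | [], _ => 0   -- unreachable inside Pre_ (Python would raise IndexError here)
  | p :: rest, k =>
    let lt := (p :: rest).filter (fun x => decide (x < p))
    if k < lt.length then pvSelect lt k
    else
      let eq := (p :: rest).filter (fun x => x == p)
      if k < lt.length + eq.length then p
      else pvSelect ((p :: rest).filter (fun x => decide (p < x))) (k - lt.length - eq.length)
termination_by xs _ => xs.length
decreasing_by
  · simp only [List.filter_cons, decide_eq_true_eq, lt_irrefl, if_false, List.length_cons]
    exact Nat.lt_succ_of_le (List.length_filter_le _ _)
  · simp only [List.filter_cons, decide_eq_true_eq, lt_irrefl, if_false, List.length_cons]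
    exact Nat.lt_succ_of_le (List.length_filter_le _ _)

def minMoves2_alt (nums : List Int) : Int :=
  let m := pvSelect nums (nums.length / 2)
  nums.foldl (fun r x => r + |m - x|) 0

-- ===== PRECONDITION & SPEC =====
-- Pre_ excludes exactly the empty list, on which Python A raises IndexError (and so does B).
def Pre_minMoves2 (nums : List Int) : Prop := nums ≠ []
instance (nums : List Int) : Decidable (Pre_minMoves2 nums) := by unfold Pre_minMoves2; infer_instance
def pvWitness_minMoves2 : List Int := [2, 1, 7]

def Spec_minMoves2 (nums : List Int) (out : Int) : Prop := out = minMoves2_alt nums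
instance (nums : List Int) (out : Int) : Decidable (Spec_minMoves2 nums out) := by unfold Spec_minMoves2; infer_instance

-- ===== CLAIM (what is proved, stated in full; the proofs are below) =====
def Claim_equal_minMoves2 : Prop := ∀ (nums : List Int), Dom_minMoves2 nums → Pre_minMoves2 nums → Spec_minMoves2 nums (minMoves2 nums)

-- ===== LEMMAS AND PROOFS =====

-- the k-th order statistic, characterised by counts
def pvIsKth (xs : List Int) (k : Nat) (m : Int) : Prop :=
  xs.countP (fun x => decide (x < m)) ≤ k ∧ k < xs.countP (fun x => decide (x ≤ m))

theorem pvCountP_split {α : Type} (l : List α) (r s : α → Bool) :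
    l.countP r = l.countP (fun x => r x && s x) + l.countP (fun x => r x && !s x) := by
  induction l with
  | nil => simp
  | cons a t ih =>
      simp only [List.countP_cons, ih]
      cases hr : r a <;> cases hs : s a <;> simp <;> omega

theorem pvCount3 (p : Int) (l : List Int) :
    l.countP (fun x => decide (x < p)) + l.countP (fun x => x == p)
      + l.countP (fun x => decide (p < x)) = l.length := by
  induction l with
  | nil => simp
  | cons a t ih =>
      simp only [List.countP_cons, List.length_cons, decide_eq_true_eq, beq_iff_eq]
      split_ifs <;> omega

theorem pvCountLe (p : Int) (l : List Int) :
    l.countP (fun x => decide (x ≤ p))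
      = l.countP (fun x => decide (x < p)) + l.countP (fun x => x == p) := by
  induction l with
  | nil => simp
  | cons a t ih =>
      simp only [List.countP_cons, decide_eq_true_eq, beq_iff_eq]
      split_ifs <;> omega

theorem pvSelect_isKth : ∀ (xs : List Int) (k : Nat), k < xs.length → pvIsKth xs k (pvSelect xs k)
  | [], k => by intro h; simp at h
  | p :: rest, k => by
    intro hk
    set X := p :: rest with hX
    have hlt_len : (X.filter (fun x => decide (x < p))).length < X.length := by
      rw [hX]
      simp only [List.filter_cons, decide_eq_true_eq, lt_irrefl, if_false, List.length_cons]
      exact Nat.lt_succ_of_le (List.length_filter_le _ _)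
    have hgt_len : (X.filter (fun x => decide (p < x))).length < X.length := by
      rw [hX]
      simp only [List.filter_cons, decide_eq_true_eq, lt_irrefl, if_false, List.length_cons]
      exact Nat.lt_succ_of_le (List.length_filter_le _ _)
    rw [pvSelect]
    show pvIsKth X k
      (if k < ((p :: rest).filter (fun x => decide (x < p))).length then
        pvSelect ((p :: rest).filter (fun x => decide (x < p))) k
      else if k < ((p :: rest).filter (fun x => decide (x < p))).length
            + ((p :: rest).filter (fun x => x == p)).length then p
      else pvSelect ((p :: rest).filter (fun x => decide (p < x)))
            (k - ((p :: rest).filter (fun x => decide (x < p))).length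
               - ((p :: rest).filter (fun x => x == p)).length))
    rw [← hX]
    set lt := X.filter (fun x => decide (x < p)) with hlt
    set eqf := X.filter (fun x => x == p) with heq
    set gt := X.filter (fun x => decide (p < x)) with hgt
    have hclt : X.countP (fun x => decide (x < p)) = lt.length := by
      rw [hlt, ← List.countP_eq_length_filter]
    have hceq : X.countP (fun x => x == p) = eqf.length := by
      rw [heq, ← List.countP_eq_length_filter]
    have hcgt : X.countP (fun x => decide (p < x)) = gt.length := by
      rw [hgt, ← List.countP_eq_length_filter]
    have h3 := pvCount3 p X
    by_cases h1 : k < lt.length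
    · -- recurse into lt; the result m is < p
      simp only [h1, if_true]
      have ih := pvSelect_isKth lt k h1
      set m := pvSelect lt k with hm
      obtain ⟨ihl, ihr⟩ := ih
      have hmp : m < p := by
        by_contra hnot
        push Not at hnot
        have : lt.countP (fun x => decide (x < m)) = lt.length := by
          apply List.countP_eq_length.mpr
          intro a ha
          rw [hlt] at ha
          have := List.of_mem_filter ha
          simp only [decide_eq_true_eq] at this ⊢
          exact lt_of_lt_of_le this hnot
        omega
      constructor
      · calc X.countP (fun x => decide (x < m))
            = X.countP (fun x => decide (x < m) && decide (x < p)) := by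
              apply List.countP_congr
              intro a _
              by_cases ham : a < m
              · simp [ham, lt_trans ham hmp]
              · simp [ham]
          _ = lt.countP (fun x => decide (x < m)) := by
              rw [hlt, List.countP_filter]
          _ ≤ k := ihl
      · calc k < lt.countP (fun x => decide (x ≤ m)) := ihr
          _ = X.countP (fun x => decide (x ≤ m) && decide (x < p)) := by
              rw [hlt, List.countP_filter]
          _ = X.countP (fun x => decide (x ≤ m)) := by
              apply List.countP_congr
              intro a _
              by_cases ham : a ≤ m
              · simp [ham, lt_of_le_of_lt ham hmp]
              · simp [ham]
    · simp only [h1, if_false]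
      by_cases h2 : k < lt.length + eqf.length
      · -- the pivot itself
        simp only [h2, if_true]
        constructor
        · rw [hclt]; omega
        · rw [pvCountLe, hclt, hceq]; omega
      · -- recurse into gt; the result m is > p
        simp only [h2, if_false]
        push Not at h1 h2
        have hk' : k - lt.length - eqf.length < gt.length := by
          have h4 : k < X.length := hX ▸ hk
          omega
        have ih := pvSelect_isKth gt (k - lt.length - eqf.length) hk'
        set m := pvSelect gt (k - lt.length - eqf.length) with hm
        obtain ⟨ihl, ihr⟩ := ih
        have hpm : p < m := by
          have hpos : 0 < gt.countP (fun x => decide (x ≤ m)) := by omega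
          obtain ⟨a, ha, hpa⟩ := List.countP_pos_iff.mp hpos
          rw [hgt] at ha
          have := List.of_mem_filter ha
          simp only [decide_eq_true_eq] at this hpa
          exact lt_of_lt_of_le this hpa
        have hsplit_lt : X.countP (fun x => decide (x < m))
            = X.countP (fun x => decide (x ≤ p)) + gt.countP (fun x => decide (x < m)) := by
          rw [pvCountP_split X (fun x => decide (x < m)) (fun x => decide (x ≤ p))]
          congr 1
          · apply List.countP_congr
            intro a _
            by_cases hap : a ≤ p
            · simp [hap, lt_of_le_of_lt hap hpm]
            · simp [hap]
          · rw [hgt, List.countP_filter]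
            apply List.countP_congr
            intro a _
            by_cases hap : p < a
            · simp [hap, not_le.mpr hap]
            · simp [hap, not_lt.mp hap]
        have hsplit_le : X.countP (fun x => decide (x ≤ m))
            = X.countP (fun x => decide (x ≤ p)) + gt.countP (fun x => decide (x ≤ m)) := by
          rw [pvCountP_split X (fun x => decide (x ≤ m)) (fun x => decide (x ≤ p))]
          congr 1
          · apply List.countP_congr
            intro a _
            by_cases hap : a ≤ p
            · simp [hap, le_of_lt (lt_of_le_of_lt hap hpm)]
            · simp [hap]
          · rw [hgt, List.countP_filter]
            apply List.countP_congr
            intro a _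
            by_cases hap : p < a
            · simp [hap, not_le.mpr hap]
            · simp [hap, not_lt.mp hap]
        have hcle : X.countP (fun x => decide (x ≤ p)) = lt.length + eqf.length := by
          rw [pvCountLe, hclt, hceq]
        constructor
        · rw [hsplit_lt, hcle]; omega
        · rw [hsplit_le, hcle]; omega
termination_by xs _ => xs.length
decreasing_by
  · exact hlt_len
  · exact hgt_len

-- the k-th characterisation is unique
theorem pvIsKth_unique (xs : List Int) (k : Nat) (m₁ m₂ : Int)
    (h₁ : pvIsKth xs k m₁) (h₂ : pvIsKth xs k m₂) : m₁ = m₂ := by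
  by_contra hne
  rcases lt_or_gt_of_ne hne with h | h
  · have : xs.countP (fun x => decide (x ≤ m₁)) ≤ xs.countP (fun x => decide (x < m₂)) := by
      apply List.countP_mono_left
      intro a _ ha
      simp only [decide_eq_true_eq] at ha ⊢
      exact lt_of_le_of_lt ha h
    obtain ⟨_, h₁r⟩ := h₁; obtain ⟨h₂l, _⟩ := h₂; omega
  · have : xs.countP (fun x => decide (x ≤ m₂)) ≤ xs.countP (fun x => decide (x < m₁)) := by
      apply List.countP_mono_left
      intro a _ ha
      simp only [decide_eq_true_eq] at ha ⊢
      exact lt_of_le_of_lt ha h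
    obtain ⟨h₁l, _⟩ := h₁; obtain ⟨_, h₂r⟩ := h₂; omega

-- on a getElem-monotone list, the j-th element is the j-th order statistic
theorem pvSorted_isKth (s : List Int)
    (hmono : ∀ p q : Nat, p ≤ q → ∀ (hq : q < s.length) (hp : p < s.length), s[p] ≤ s[q])
    (j : Nat) (hj : j < s.length) : pvIsKth s j (s.getD j 0) := by
  rw [List.getD_eq_getElem s 0 hj]
  set m := s[j] with hm
  constructor
  · have h0 : (s.drop j).countP (fun x => decide (x < m)) = 0 := by
      apply List.countP_eq_zero.mpr
      intro a ha
      obtain ⟨i, hi, hai⟩ := List.mem_iff_getElem.mp ha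
      have hji : j + i < s.length := by rw [List.length_drop] at hi; omega
      rw [List.getElem_drop] at hai
      have hle : m ≤ s[j + i]'hji := hm ▸ hmono j (j + i) (Nat.le_add_right _ _) hji hj
      rw [hai] at hle
      simp only [decide_eq_true_eq]
      omega
    calc s.countP (fun x => decide (x < m))
        = (s.take j ++ s.drop j).countP (fun x => decide (x < m)) := by
          rw [List.take_append_drop]
      _ = (s.take j).countP (fun x => decide (x < m))
          + (s.drop j).countP (fun x => decide (x < m)) := List.countP_append
      _ = (s.take j).countP (fun x => decide (x < m)) := by rw [h0, Nat.add_zero]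
      _ ≤ (s.take j).length := List.countP_le_length
      _ ≤ j := by simp
  · have hlen : (s.take (j + 1)).length = j + 1 := by rw [List.length_take]; omega
    have hall : (s.take (j + 1)).countP (fun x => decide (x ≤ m)) = (s.take (j + 1)).length := by
      apply List.countP_eq_length.mpr
      intro a ha
      obtain ⟨i, hi, hai⟩ := List.mem_iff_getElem.mp ha
      rw [hlen] at hi
      have his : i < s.length := by omega
      rw [List.getElem_take] at hai
      have hle : s[i]'his ≤ m := hm ▸ hmono i j (by omega) hj his
      rw [hai] at hle
      simp only [decide_eq_true_eq]
      omega
    calc j < j + 1 := Nat.lt_succ_self j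
      _ = (s.take (j + 1)).countP (fun x => decide (x ≤ m)) := by rw [hall, hlen]
      _ ≤ (s.take (j + 1)).countP (fun x => decide (x ≤ m))
          + (s.drop (j + 1)).countP (fun x => decide (x ≤ m)) := Nat.le_add_right _ _
      _ = s.countP (fun x => decide (x ≤ m)) := by
          rw [← List.countP_append, List.take_append_drop]

-- fold of additions = running sum
theorem pvFoldlAdd {α : Type} (g : α → Int) (xs : List α) (init : Int) :
    xs.foldl (fun r x => r + g x) init = init + (xs.map g).sum := by
  induction xs generalizing init with
  | nil => simp
  | cons a t ih => simp [ih, add_assoc]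

-- ===== VERDICT (by name: the statement is the Claim_ definition above) =====
theorem minMoves2_spec : Claim_equal_minMoves2 := by
  intro nums _ hpre
  unfold Spec_minMoves2 minMoves2 minMoves2_alt
  simp only [PySem.List.len_eq]
  set s := PySem.List.sorted nums (fun x => x) false with hs
  have hperm : s.Perm nums := PySem.List.sorted_perm nums (fun x => x) false
  have hlen : s.length = nums.length := hperm.length_eq
  have hne : s ≠ [] := by
    simp only [hs, ne_eq, PySem.List.sorted_eq_nil_iff]; exact hpre
  have hpos : 0 < s.length := List.length_pos_iff.mpr hne
  have hfd : PySem.Int.floordiv (s.length : Int) 2 = ((s.length / 2 : Nat) : Int) := by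
    exact_mod_cast PySem.Int.floordiv_natCast s.length 2
  rw [hfd]
  have hj : s.length / 2 < s.length := Nat.div_lt_self hpos (by norm_num)
  rw [PySem.List.pyGetD_natCast]
  -- A's median is the (n/2)-th order statistic of nums
  have hmono : ∀ p q : Nat, p ≤ q → ∀ (hq : q < s.length) (hp : p < s.length), s[p] ≤ s[q] := by
    intro p q hpq hq hp
    exact PySem.List.sorted_id_getElem_mono nums hpq hq
  have hA : pvIsKth nums (s.length / 2) (s.getD (s.length / 2) 0) := by
    have := pvSorted_isKth s hmono (s.length / 2) hj
    obtain ⟨hl, hr⟩ := this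
    exact ⟨by rw [← hperm.countP_eq]; exact hl, by rw [← hperm.countP_eq]; exact hr⟩
  have hB : pvIsKth nums (nums.length / 2) (pvSelect nums (nums.length / 2)) :=
    pvSelect_isKth nums (nums.length / 2) (Nat.div_lt_self (by omega) (by norm_num))
  rw [hlen] at hA
  have hmed : s.getD (nums.length / 2) 0 = pvSelect nums (nums.length / 2) :=
    pvIsKth_unique nums (nums.length / 2) _ _ hA hB
  rw [hlen, hmed]
  rw [pvFoldlAdd, pvFoldlAdd]
  congr 1
  exact (hperm.map _).sum_eq
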